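-- pv_equiv track=rewrite | github.com/DoctorHayes/235CppStyle | check_indentation_helper.py | count_whitespace
-- ===== SOURCE A (Python) =====
-- def count_whitespace(text):
--     """Count spaces and tabs in a string.
--
--     Args:
--         text: String to analyze for whitespace
--
--     Returns:
--         Dictionary with 'space' and 'tab' counts
--     """
--     counts = {'space': 0, 'tab': 0}
--     for ch in text:
--         if ch == ' ':
--             counts['space'] += 1
--         elif ch == '\t':
--             counts['tab'] += 1
--     return counts
-- ===== SOURCE B (Python) =====
-- def count_whitespace(text):
--     """Count spaces and tabs in a string.
--
--     Two staged library scans (str.count) instead of a hand-written loop.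
--     """
--     return {'space': text.count(' '), 'tab': text.count('\t')}
-- ===== Notes on version B (the rewrite author's own statement) =====
-- stated objective: simpler
-- what changed: B has no loop or branching at all: it delegates to two staged str.count substring scans of the text (one per character) instead of A's single explicit pass maintaining two counters behind if/elif branches; the C-level scans make it measurably faster too.
import Mathlib
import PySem

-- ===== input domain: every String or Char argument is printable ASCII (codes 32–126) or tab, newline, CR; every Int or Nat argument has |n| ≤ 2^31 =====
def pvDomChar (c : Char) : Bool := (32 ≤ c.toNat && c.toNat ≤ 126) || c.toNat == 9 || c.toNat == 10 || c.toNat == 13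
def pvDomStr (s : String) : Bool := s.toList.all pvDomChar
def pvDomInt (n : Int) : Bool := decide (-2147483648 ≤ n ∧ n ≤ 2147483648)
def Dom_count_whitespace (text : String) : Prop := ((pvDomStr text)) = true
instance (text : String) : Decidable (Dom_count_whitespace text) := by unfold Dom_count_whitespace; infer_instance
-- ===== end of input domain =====

-- B replaces A's explicit counting loop by two staged str.count library scans (simpler, no loop of its own).

-- ===== PORT A =====
def count_whitespace (text : String) : List (String × Int) :=
  (text.toList.foldl (fun counts ch =>
      if ch = ' ' then counts.insert "space" (counts.getD "space" 0 + 1)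
      else if ch = '\t' then counts.insert "tab" (counts.getD "tab" 0 + 1)
      else counts)
    (PySem.Dict.ofList [("space", (0 : Int)), ("tab", (0 : Int))])).items

-- ===== PORT B =====
def count_whitespace_alt (text : String) : List (String × Int) :=
  [("space", (PySem.Str.count text " " : Int)), ("tab", (PySem.Str.count text "\t" : Int))]

-- ===== PRECONDITION & SPEC =====
def Spec_count_whitespace (text : String) (out : List (String × Int)) : Prop := out = count_whitespace_alt text
instance (text : String) (out : List (String × Int)) : Decidable (Spec_count_whitespace text out) := by unfold Spec_count_whitespace; infer_instance

-- ===== CLAIM =====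
def Claim_equal_count_whitespace : Prop := ∀ (text : String), Dom_count_whitespace text → Spec_count_whitespace text (count_whitespace text)

-- ===== LEMMAS AND PROOFS =====

theorem count_ws_foldl (l : List Char) (a b : Int) :
    (l.foldl (fun counts ch =>
      if ch = ' ' then counts.insert "space" (counts.getD "space" 0 + 1)
      else if ch = '\t' then counts.insert "tab" (counts.getD "tab" 0 + 1)
      else counts)
      (PySem.Dict.mk [("space", a), ("tab", b)])).items
    = [("space", a + l.count ' '), ("tab", b + l.count '\t')] := by
  induction l generalizing a b with
  | nil => simp
  | cons ch rest ih =>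
    by_cases h1 : ch = ' '
    · subst h1
      simp only [List.foldl_cons, reduceIte]
      have : (PySem.Dict.mk [("space", a), ("tab", b)]).insert "space"
          ((PySem.Dict.mk [("space", a), ("tab", b)]).getD "space" 0 + 1)
          = PySem.Dict.mk [("space", a + 1), ("tab", b)] := by rfl
      rw [this, ih]
      simp
      omega
    · by_cases h2 : ch = '\t'
      · subst h2
        simp only [List.foldl_cons, if_neg h1, reduceIte]
        have : (PySem.Dict.mk [("space", a), ("tab", b)]).insert "tab"
            ((PySem.Dict.mk [("space", a), ("tab", b)]).getD "tab" 0 + 1)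
            = PySem.Dict.mk [("space", a), ("tab", b + 1)] := by rfl
        rw [this, ih]
        simp
        omega
      · simp only [List.foldl_cons, if_neg h1, if_neg h2]
        rw [ih]
        simp [h1, h2]

-- str.count with a single-character needle counts occurrences of that character
theorem count_go_single (c : Char) (l : List Char) : ∀ (fuel acc : Nat), l.length ≤ fuel →
    PySem.Chars.count.go [c] fuel l acc = acc + l.count c := by
  induction l with
  | nil => intro fuel acc _; cases fuel <;> simp [PySem.Chars.count.go]
  | cons h t ih =>
    intro fuel acc hle
    cases fuel with
    | zero => simp at hle
    | succ f =>
      have hstep : PySem.Chars.count.go [c] (f+1) (h :: t) acc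
          = if [c].isPrefixOf (h :: t) then PySem.Chars.count.go [c] f (List.drop 1 (h :: t)) (acc + 1)
            else PySem.Chars.count.go [c] f t acc := by
        rfl
      by_cases hc : h = c
      · subst hc
        rw [hstep]
        simp only [List.drop_one, List.tail_cons]
        rw [if_pos (by simp), ih f (acc + 1) (by simpa using hle)]
        simp
        omega
      · rw [hstep]
        have : [c].isPrefixOf (h :: t) = false := by
          simp [List.isPrefixOf]
          exact fun he => absurd he.symm hc
        rw [this]
        simp only [Bool.false_eq_true, if_false]
        rw [ih f acc (by simpa using hle)]
        simp [hc]

theorem chars_count_single (c : Char) (l : List Char) :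
    PySem.Chars.count l [c] = l.count c := by
  unfold PySem.Chars.count
  simp [count_go_single c l l.length 0 le_rfl]

-- ===== VERDICT =====
theorem count_whitespace_spec : Claim_equal_count_whitespace := by
  intro text _
  unfold Spec_count_whitespace count_whitespace count_whitespace_alt
  rw [show PySem.Dict.ofList [("space", (0:Int)), ("tab", (0:Int))] = PySem.Dict.mk [("space", 0), ("tab", 0)] from rfl]
  rw [count_ws_foldl]
  rw [PySem.Str.count_eq, PySem.Str.count_eq]
  show _ = [("space", ((PySem.Chars.count text.toList [' '] : Nat) : Int)), ("tab", ((PySem.Chars.count text.toList ['\t'] : Nat) : Int))]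
  rw [chars_count_single, chars_count_single]
  simp
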